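-- pv_equiv track=rewrite | github.com/jlelia/python_tools | scripts/qr_gen_cli.py | _col_runs
-- ===== SOURCE A (Python) =====
-- from typing import Iterable, List, Sequence, Tuple
--
-- def _col_runs(mat: List[List[bool]], j: int) -> Iterable[Tuple[int, int]]:
-- 	start = None
-- 	for i in range(len(mat)):
-- 		v = mat[i][j]
-- 		if v and start is None:
-- 			start = i
-- 		elif not v and start is not None:
-- 			yield (start, i - 1)
-- 			start = None
-- 	if start is not None:
-- 		yield (start, len(mat) - 1)
-- ===== SOURCE B (Python) =====
-- def _col_runs(mat, j):
-- 	col = [row[j] for row in mat]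
-- 	n = len(col)
-- 	starts = [i for i in range(n) if col[i] and (i == 0 or not col[i - 1])]
-- 	ends = [i for i in range(n) if col[i] and (i == n - 1 or not col[i + 1])]
-- 	yield from zip(starts, ends)
-- ===== Notes on version B (the rewrite author's own statement) =====
-- stated objective: alternative
-- what changed: Replaced the single-pass start-sentinel state machine with staged passes: extract the column, detect run starts (True with no True before) and run ends (True with no True after) as two boundary filters, and zip the two lists.
import Mathlib
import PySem

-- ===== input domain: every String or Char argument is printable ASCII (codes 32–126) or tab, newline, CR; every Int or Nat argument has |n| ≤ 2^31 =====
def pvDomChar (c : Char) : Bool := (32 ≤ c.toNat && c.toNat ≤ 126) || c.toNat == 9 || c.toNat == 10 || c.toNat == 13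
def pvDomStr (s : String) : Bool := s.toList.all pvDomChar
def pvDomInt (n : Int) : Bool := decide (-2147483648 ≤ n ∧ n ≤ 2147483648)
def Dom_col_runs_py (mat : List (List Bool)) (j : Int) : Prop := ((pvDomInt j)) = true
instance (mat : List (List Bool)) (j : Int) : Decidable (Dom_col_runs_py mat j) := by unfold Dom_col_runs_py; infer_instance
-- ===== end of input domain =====

-- B replaces A's single-pass start-sentinel state machine by staged boundary passes
-- (run starts, run ends, zipped); equivalence is about the list of yielded pairs.

-- ===== PORT A =====
-- loop over the rows with running index i and the Option-valued 'start' sentinel,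
-- exactly as A's for-loop; mat[i][j] via pyGet? (Pre_ guarantees the index is in range,
-- so the getD default is never used on admitted inputs)
def colRunsALoop (rows : List (List Bool)) (j : Int) (i : Int) (start : Option Int) :
    List (Int × Int) :=
  match rows with
  | [] =>
    match start with
    | some s => [(s, i - 1)]   -- trailing 'if start is not None: yield (start, len(mat)-1)'
    | none => []
  | r :: rs =>
    let v := (PySem.List.pyGet? r j).getD false
    match start, v with
    | none, true => colRunsALoop rs j (i + 1) (some i)
    | some s, false => (s, i - 1) :: colRunsALoop rs j (i + 1) none
    | _, _ => colRunsALoop rs j (i + 1) start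

def col_runs_py (mat : List (List Bool)) (j : Int) : List (Int × Int) :=
  colRunsALoop mat j 0 none

-- ===== PORT B =====
-- staged passes: extract the column, filter run-start indices (True with no True
-- before), filter run-end indices (True with no True after), zip the two lists
def bCol (mat : List (List Bool)) (j : Int) : List Bool :=
  mat.map (fun r => (PySem.List.pyGet? r j).getD false)

def col_runs_py_alt (mat : List (List Bool)) (j : Int) : List (Int × Int) :=
  let col := bCol mat j
  let n := col.length
  let starts := ((List.range n).filter
      (fun i => col.getD i false && (decide (i = 0) || !(col.getD (i - 1) false)))).map Int.ofNat
  let ends := ((List.range n).filter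
      (fun i => col.getD i false && (decide (i = n - 1) || !(col.getD (i + 1) false)))).map Int.ofNat
  starts.zip ends

-- ===== PRECONDITION & SPEC =====
-- Pre_ excludes exactly the inputs where Python A raises IndexError: j must be a
-- valid (possibly negative) index into every row of mat.
def Pre_col_runs_py (mat : List (List Bool)) (j : Int) : Prop :=
  ∀ r ∈ mat, -(r.length : Int) ≤ j ∧ j < (r.length : Int)
instance (mat : List (List Bool)) (j : Int) : Decidable (Pre_col_runs_py mat j) := by
  unfold Pre_col_runs_py; infer_instance

def pvWitness_col_runs_py : List (List Bool) × Int :=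
  ([[true, false], [false, true], [true, true]], 0)

def Spec_col_runs_py (mat : List (List Bool)) (j : Int) (out : List (Int × Int)) : Prop := out = col_runs_py_alt mat j
instance (mat : List (List Bool)) (j : Int) (out : List (Int × Int)) : Decidable (Spec_col_runs_py mat j out) := by unfold Spec_col_runs_py; infer_instance

-- ===== CLAIM (what is proved, stated in full; the proofs are below) =====
def Claim_equal_col_runs_py : Prop := ∀ (mat : List (List Bool)) (j : Int), Dom_col_runs_py mat j → Pre_col_runs_py mat j → Spec_col_runs_py mat j (col_runs_py mat j)

-- ===== LEMMAS AND PROOFS =====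

-- recursive characterisation of B's start-index filter ('prev' = the element before the head)
def sIdx : Bool → List Bool → Int → List Int
  | _, [], _ => []
  | prev, v :: rest, k => (if v && !prev then [k] else []) ++ sIdx v rest (k + 1)

-- recursive characterisation of B's end-index filter
def eIdx : List Bool → Int → List Int
  | [], _ => []
  | v :: rest, k => (if v && !(rest.headD false) then [k] else []) ++ eIdx rest (k + 1)

-- end indices when a run is pending (started strictly before position k)
def eIdxP : List Bool → Int → List Int
  | [], k => [k - 1]
  | v :: rest, k => if v then eIdxP rest (k + 1) else (k - 1) :: eIdx rest (k + 1)

-- A's state machine, abstracted over the already-extracted column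
def runsA : List Bool → Int → Option Int → List (Int × Int)
  | [], i, some s => [(s, i - 1)]
  | [], _, none => []
  | v :: rest, i, st =>
    match st, v with
    | none, true => runsA rest (i + 1) (some i)
    | some s, false => (s, i - 1) :: runsA rest (i + 1) none
    | _, _ => runsA rest (i + 1) st

lemma colRunsALoop_eq_runsA (rows : List (List Bool)) (j : Int) :
    ∀ (i : Int) (st : Option Int), colRunsALoop rows j i st = runsA (bCol rows j) i st := by
  induction rows with
  | nil => intro i st; cases st <;> simp [colRunsALoop, bCol, runsA]
  | cons r rs ih =>
    intro i st
    have hcol : bCol (r :: rs) j = ((PySem.List.pyGet? r j).getD false) :: bCol rs j := rfl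
    rw [hcol]
    simp only [colRunsALoop, runsA]
    cases st <;> cases h : (PySem.List.pyGet? r j).getD false <;> simp only [h] <;> rw [ih]

-- start filter with 'prev' accounted for as an if (pointwise equal to B's || form)
def sPredP (prev : Bool) (l : List Bool) (i : Nat) : Bool :=
  l.getD i false && (if i = 0 then !prev else !(l.getD (i - 1) false))

lemma sPredP_shift (prev v : Bool) (rest : List Bool) :
    (fun i => sPredP prev (v :: rest) (Nat.succ i)) = sPredP v rest := by
  funext i
  cases i <;> simp [sPredP]

lemma filter_range_sPredP (l : List Bool) :
    ∀ (prev : Bool) (k : Int),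
      ((List.range l.length).filter (sPredP prev l)).map (fun i => Int.ofNat i + k)
        = sIdx prev l k := by
  induction l with
  | nil => intro prev k; simp [sIdx]
  | cons v rest ih =>
    intro prev k
    rw [List.length_cons, List.range_succ_eq_map]
    simp only [List.filter_cons, List.filter_map]
    have h0 : sPredP prev (v :: rest) 0 = (v && !prev) := by simp [sPredP]
    have hshift : (sPredP prev (v :: rest)) ∘ Nat.succ = sPredP v rest := by
      funext i; exact congrFun (sPredP_shift prev v rest) i
    rw [hshift]
    have hmap : ((fun i : Nat => Int.ofNat i + k) ∘ Nat.succ) = fun i : Nat => Int.ofNat i + (k + 1) := by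
      funext i; simp only [Function.comp_apply, Int.ofNat_eq_natCast]; push_cast; ring
    cases hv : (v && !prev) <;>
      simp only [h0, hv, Bool.false_eq_true, reduceIte, List.map_cons, List.map_map] <;>
      rw [hmap, ih v (k + 1)] <;> simp [sIdx, hv]

-- end filter predicate
def ePred (l : List Bool) (i : Nat) : Bool :=
  l.getD i false && (decide (i = l.length - 1) || !(l.getD (i + 1) false))

lemma ePred_shift (v : Bool) (rest : List Bool) :
    (ePred (v :: rest)) ∘ Nat.succ = ePred rest := by
  funext i
  cases rest with
  | nil => simp [ePred]
  | cons b r2 =>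
    simp [ePred, Nat.succ_eq_add_one]

lemma ePred_zero (v : Bool) (rest : List Bool) :
    ePred (v :: rest) 0 = (v && !(rest.headD false)) := by
  cases rest <;> simp [ePred]

lemma filter_range_ePred (l : List Bool) :
    ∀ (k : Int),
      ((List.range l.length).filter (ePred l)).map (fun i => Int.ofNat i + k) = eIdx l k := by
  induction l with
  | nil => intro k; simp [eIdx]
  | cons v rest ih =>
    intro k
    rw [List.length_cons, List.range_succ_eq_map]
    simp only [List.filter_cons, List.filter_map]
    rw [ePred_shift]
    have hmap : ((fun i : Nat => Int.ofNat i + k) ∘ Nat.succ) = fun i : Nat => Int.ofNat i + (k + 1) := by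
      funext i; simp only [Function.comp_apply, Int.ofNat_eq_natCast]; push_cast; ring
    cases hv : (v && !(rest.headD false)) <;>
      simp only [ePred_zero, hv, Bool.false_eq_true, reduceIte, List.map_cons, List.map_map] <;>
      rw [hmap, ih (k + 1),
        show eIdx (v :: rest) k
          = (if v && !(rest.headD false) then [k] else []) ++ eIdx rest (k + 1) from rfl,
        hv] <;> simp

-- ends of (true :: rest) are the pending-run ends of rest
lemma eIdx_true_cons (rest : List Bool) : ∀ k, eIdx (true :: rest) k = eIdxP rest (k + 1) := by
  induction rest with
  | nil => intro k; simp [eIdx, eIdxP]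
  | cons b r2 ih =>
    intro k
    cases b with
    | false => simp [eIdx, eIdxP]
    | true =>
      have := ih (k + 1)
      simp only [eIdx, List.headD_cons, Bool.not_true, Bool.and_false] at this ⊢
      simp only [eIdxP]
      simpa [eIdx] using this

-- the state machine equals zip of starts and ends, in both machine states
lemma runsA_zip (col : List Bool) :
    ∀ k : Int,
      (runsA col k none = (sIdx false col k).zip (eIdx col k)) ∧
      (∀ s : Int, runsA col k (some s) = ((s :: sIdx true col k).zip (eIdxP col k))) := by
  induction col with
  | nil => intro k; refine ⟨by simp [runsA, sIdx, eIdx], fun s => by simp [runsA, sIdx, eIdxP]⟩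
  | cons v rest ih =>
    intro k
    constructor
    · cases v with
      | false =>
        simp only [runsA, sIdx, eIdx]
        simpa using (ih (k + 1)).1
      | true =>
        simp only [runsA]
        rw [(ih (k + 1)).2 k, eIdx_true_cons]
        simp [sIdx]
    · intro s
      cases v with
      | false =>
        simp only [runsA, sIdx, eIdxP]
        rw [(ih (k + 1)).1]
        simp
      | true =>
        simp only [runsA, sIdx, eIdxP]
        rw [(ih (k + 1)).2 s]
        simp

-- B's literal filter predicates coincide with sPredP/ePred
lemma bStarts_pred (col : List Bool) :
    (fun i => col.getD i false && (decide (i = 0) || !(col.getD (i - 1) false)))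
      = sPredP false col := by
  funext i; cases i <;> simp [sPredP]

lemma alt_eq (mat : List (List Bool)) (j : Int) :
    col_runs_py_alt mat j = (sIdx false (bCol mat j) 0).zip (eIdx (bCol mat j) 0) := by
  have hs := bStarts_pred (bCol mat j)
  have he : (fun i => (bCol mat j).getD i false &&
      (decide (i = (bCol mat j).length - 1) || !((bCol mat j).getD (i + 1) false)))
      = ePred (bCol mat j) := rfl
  have hmap : (Int.ofNat : Nat → Int) = fun i : Nat => Int.ofNat i + 0 := by funext i; simp
  simp only [col_runs_py_alt]
  rw [hs, he, hmap, filter_range_sPredP, filter_range_ePred]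

-- ===== VERDICT (by name: the statement is the Claim_ definition above) =====
theorem col_runs_py_spec : Claim_equal_col_runs_py := by
  intro mat j _ _
  unfold Spec_col_runs_py col_runs_py
  rw [colRunsALoop_eq_runsA, (runsA_zip (bCol mat j) 0).1, alt_eq]
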